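-- pv_equiv track=rewrite | github.com/felisaga/bingo | src/bingo.py | mayores_abajo
-- ===== SOURCE A (Python) =====
-- def mayores_abajo(carton):
--     ban = 0
--     for columna in range(9):
--         for fila in range(3):
--             if carton[fila][columna] != 0:
--                 if ban != 0:
--                     if ban > carton[fila][columna]:
--                         return False
--                 ban = carton[fila][columna]
--         ban = 0
--     return True
-- ===== SOURCE B (Python) =====
-- def mayores_abajo(carton):
--     def go(k, prev):
--         if k == 27:
--             return True
--         if k % 3 == 0:
--             prev = 0
--         v = carton[k % 3][k // 3]
--         if v != 0:
--             if prev != 0 and prev > v: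
--                 return False
--             prev = v
--         return go(k + 1, prev)
--     return go(0, 0)
-- ===== Notes on version B (the rewrite author's own statement) =====
-- stated objective: alternative
-- what changed: Replaces A's nested for-loops over columns and rows with a single tail-recursive pass over one linearized cell index k in range(27) (fila = k % 3, columna = k // 3), resetting the previous-value accumulator arithmetically at each column boundary; same traversal order and raise points, so B matches A on every input, and Pre_ only excludes inputs where both raise IndexError.
import Mathlib
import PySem

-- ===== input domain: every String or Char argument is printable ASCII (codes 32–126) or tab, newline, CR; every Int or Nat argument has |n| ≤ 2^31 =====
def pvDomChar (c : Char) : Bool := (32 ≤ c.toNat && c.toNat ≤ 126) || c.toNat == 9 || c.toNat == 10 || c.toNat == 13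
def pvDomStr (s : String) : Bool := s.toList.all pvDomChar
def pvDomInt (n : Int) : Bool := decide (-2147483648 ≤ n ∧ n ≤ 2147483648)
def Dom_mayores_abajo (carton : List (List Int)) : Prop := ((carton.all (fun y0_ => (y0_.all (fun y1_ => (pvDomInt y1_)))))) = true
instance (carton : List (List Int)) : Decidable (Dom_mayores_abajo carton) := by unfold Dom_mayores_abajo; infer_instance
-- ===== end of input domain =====

-- B replaces A's nested column/row loops by one tail-recursive pass over a single
-- linearized cell index k ∈ range(27) (fila = k % 3, columna = k // 3), resetting the
-- previous-value accumulator at each column boundary (objective: alternative decomposition).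

-- ===== PORT A =====
-- carton[fila][columna]; exact inside Pre_ (every cell A reads exists there,
-- so pyGet? is always `some` and the .getD 0 default is never taken)
def pvVal (carton : List (List Int)) (fila columna : Int) : Int :=
  ((PySem.List.pyGet? carton fila).bind (fun row => PySem.List.pyGet? row columna)).getD 0

-- body of A's inner `for fila` loop; the state is A's `ban`, `none` encodes `return False`
def pvStepA (carton : List (List Int)) (columna : Int) (st : Option Int) (fila : Int) : Option Int :=
  match st with
  | none => none
  | some ban =>
    let v := pvVal carton fila columna
    if v ≠ 0 then
      if ban ≠ 0 then
        if ban > v then none else some v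
      else some v
    else some ban

-- A's inner `for fila in range(3)` loop starting from the current ban
def pvColA (carton : List (List Int)) (ban : Int) (columna : Int) : Option Int :=
  (PySem.List.pyRange 0 3 1).foldl (pvStepA carton columna) (some ban)

def mayores_abajo (carton : List (List Int)) : Bool :=
  ((PySem.List.pyRange 0 9 1).foldl (fun st columna =>
      match st with
      | none => none
      | some ban =>
        match pvColA carton ban columna with
        | none => none
        | some _ => some (0 : Int)) (some (0 : Int))).isSome

-- ===== PORT B =====
-- B's recursive `go(k, prev)`; the guard `27 ≤ k` (Python: `k == 27`, reached with k ≤ 27 only)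
-- makes the recursion total
def pvGoB (carton : List (List Int)) (k : Int) (prev : Int) : Bool :=
  if h : 27 ≤ k then true
  else
    let prev' := if PySem.Int.mod k 3 = 0 then 0 else prev
    let v := pvVal carton (PySem.Int.mod k 3) (PySem.Int.floordiv k 3)
    if v ≠ 0 then
      if prev' ≠ 0 ∧ prev' > v then false
      else pvGoB carton (k + 1) v
    else pvGoB carton (k + 1) prev'
termination_by (27 - k).toNat
decreasing_by all_goals omega

def mayores_abajo_alt (carton : List (List Int)) : Bool :=
  pvGoB carton 0 0

-- ===== PRECONDITION & SPEC =====
-- cell (fila f, columna c) exists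
def pvHas (carton : List (List Int)) (f c : Nat) : Prop :=
  f < carton.length ∧ c < (carton.getD f []).length

def pvV (carton : List (List Int)) (f c : Nat) : Int := (carton.getD f []).getD c 0

-- Pre_ excludes exactly the inputs on which A (and B alike) raises IndexError: A returns
-- iff either all 27 cells exist, or some column holds a decreasing nonzero pair whose
-- cells — and all cells scanned before it — exist, so `return False` fires before the
-- first missing cell is touched.
def Pre_mayores_abajo (carton : List (List Int)) : Prop :=
  (∀ c < 9, ∀ f < 3, pvHas carton f c) ∨
  (∃ c < 9, ∃ f2 < 3, ∃ f1 < f2,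
    pvV carton f1 c ≠ 0 ∧ pvV carton f2 c ≠ 0 ∧ pvV carton f2 c < pvV carton f1 c ∧
    (∀ c' < c, ∀ f < 3, pvHas carton f c') ∧ (∀ f ≤ f2, pvHas carton f c))
instance (carton : List (List Int)) : Decidable (Pre_mayores_abajo carton) := by
  unfold Pre_mayores_abajo pvHas; infer_instance

def pvWitness_mayores_abajo : List (List Int) :=
  [[1,0,3,4,5,6,7,8,9],[2,0,0,0,0,0,0,0,0],[0,0,0,0,0,0,0,0,0]]

def Spec_mayores_abajo (carton : List (List Int)) (out : Bool) : Prop := out = mayores_abajo_alt carton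
instance (carton : List (List Int)) (out : Bool) : Decidable (Spec_mayores_abajo carton out) := by unfold Spec_mayores_abajo; infer_instance

-- ===== CLAIM =====
def Claim_equal_mayores_abajo : Prop := ∀ (carton : List (List Int)), Dom_mayores_abajo carton → Pre_mayores_abajo carton → Spec_mayores_abajo carton (mayores_abajo carton)

-- ===== LEMMAS AND PROOFS =====

-- common intermediate form: scan the columns, each from ban = 0
def pvCols (carton : List (List Int)) : List Int → Bool
  | [] => true
  | c :: cs =>
    match pvColA carton 0 c with
    | none => false
    | some _ => pvCols carton cs

lemma pv_foldl_none (carton : List (List Int)) (L : List Int) :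
    (L.foldl (fun st columna =>
      match st with
      | none => none
      | some ban =>
        match pvColA carton ban columna with
        | none => none
        | some _ => some (0 : Int)) none) = none := by
  induction L with
  | nil => rfl
  | cons c L ih => simpa using ih

-- A's outer loop computes pvCols
lemma pv_A_cols (carton : List (List Int)) (L : List Int) :
    ((L.foldl (fun st columna =>
      match st with
      | none => none
      | some ban =>
        match pvColA carton ban columna with
        | none => none
        | some _ => some (0 : Int)) (some (0 : Int)))).isSome = pvCols carton L := by
  induction L with
  | nil => rfl
  | cons c L ih =>
    simp only [List.foldl, pvCols]
    cases hcol : pvColA carton 0 c with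
    | none => rw [pv_foldl_none]; rfl
    | some v => exact ih

lemma pvGoB_step (carton : List (List Int)) (k prev : Int) (hk : ¬ (27:Int) ≤ k) :
    pvGoB carton k prev =
      (let prev' := if PySem.Int.mod k 3 = 0 then 0 else prev
       let v := pvVal carton (PySem.Int.mod k 3) (PySem.Int.floordiv k 3)
       if v ≠ 0 then
         if prev' ≠ 0 ∧ prev' > v then false
         else pvGoB carton (k + 1) v
       else pvGoB carton (k + 1) prev') := by
  conv_lhs => rw [pvGoB.eq_def]
  rw [dif_neg hk]

-- B's three steps on one column equal A's inner loop on that column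
lemma pv_B_col (carton : List (List Int)) (k c prev : Int)
    (hm0 : PySem.Int.mod k 3 = 0) (hd0 : PySem.Int.floordiv k 3 = c)
    (hm1 : PySem.Int.mod (k + 1) 3 = 1) (hd1 : PySem.Int.floordiv (k + 1) 3 = c)
    (hm2 : PySem.Int.mod (k + 1 + 1) 3 = 2) (hd2 : PySem.Int.floordiv (k + 1 + 1) 3 = c)
    (hk0 : ¬ (27:Int) ≤ k) (hk1 : ¬ (27:Int) ≤ k + 1) (hk2 : ¬ (27:Int) ≤ k + 1 + 1) :
    pvGoB carton k prev =
      (match pvColA carton 0 c with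
       | none => false
       | some ban => pvGoB carton (k + 1 + 1 + 1) ban) := by
  have h3 : PySem.List.pyRange 0 3 1 = [0, 1, 2] := by decide
  rw [pvGoB_step carton k prev hk0]
  simp only [hm0, hd0]
  unfold pvColA
  rw [h3]
  simp only [List.foldl, pvStepA]
  by_cases h0 : pvVal carton 0 c = 0 <;> by_cases h1 : pvVal carton 1 c = 0 <;>
    by_cases h2 : pvVal carton 2 c = 0 <;>
    simp only [h0, h1, h2, ne_eq, not_true_eq_false, not_false_eq_true, ite_true, ite_false,
      pvGoB_step carton (k+1) _ hk1, pvGoB_step carton (k+1+1) _ hk2, hm1, hd1, hm2, hd2,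
      Int.reduceEq, false_and, true_and] <;>
    (try split_ifs) <;> (first | rfl | simp_all | omega) <;> split_ifs <;> simp_all <;> omega

-- chain the nine columns
lemma pv_B_cols (carton : List (List Int)) (prev : Int) :
    pvGoB carton 0 prev = pvCols carton [0, 1, 2, 3, 4, 5, 6, 7, 8] := by
  rw [pv_B_col carton 0 0 prev (by decide) (by decide) (by decide) (by decide) (by decide) (by decide) (by decide) (by decide) (by decide)]
  rcases h0 : pvColA carton 0 0 with _ | b0
  · simp [pvCols, h0]
  · rw [pvCols, h0]
    norm_num
    rw [pv_B_col carton 3 1 b0 (by decide) (by decide) (by decide) (by decide) (by decide) (by decide) (by decide) (by decide) (by decide)]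
    rcases h1 : pvColA carton 0 1 with _ | b1
    · simp [pvCols, h1]
    · rw [pvCols, h1]
      norm_num
      rw [pv_B_col carton 6 2 b1 (by decide) (by decide) (by decide) (by decide) (by decide) (by decide) (by decide) (by decide) (by decide)]
      rcases h2 : pvColA carton 0 2 with _ | b2
      · simp [pvCols, h2]
      · rw [pvCols, h2]
        norm_num
        rw [pv_B_col carton 9 3 b2 (by decide) (by decide) (by decide) (by decide) (by decide) (by decide) (by decide) (by decide) (by decide)]
        rcases h3 : pvColA carton 0 3 with _ | b3
        · simp [pvCols, h3]
        · rw [pvCols, h3]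
          norm_num
          rw [pv_B_col carton 12 4 b3 (by decide) (by decide) (by decide) (by decide) (by decide) (by decide) (by decide) (by decide) (by decide)]
          rcases h4 : pvColA carton 0 4 with _ | b4
          · simp [pvCols, h4]
          · rw [pvCols, h4]
            norm_num
            rw [pv_B_col carton 15 5 b4 (by decide) (by decide) (by decide) (by decide) (by decide) (by decide) (by decide) (by decide) (by decide)]
            rcases h5 : pvColA carton 0 5 with _ | b5
            · simp [pvCols, h5]
            · rw [pvCols, h5]
              norm_num
              rw [pv_B_col carton 18 6 b5 (by decide) (by decide) (by decide) (by decide) (by decide) (by decide) (by decide) (by decide) (by decide)]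
              rcases h6 : pvColA carton 0 6 with _ | b6
              · simp [pvCols, h6]
              · rw [pvCols, h6]
                norm_num
                rw [pv_B_col carton 21 7 b6 (by decide) (by decide) (by decide) (by decide) (by decide) (by decide) (by decide) (by decide) (by decide)]
                rcases h7 : pvColA carton 0 7 with _ | b7
                · simp [pvCols, h7]
                · rw [pvCols, h7]
                  norm_num
                  rw [pv_B_col carton 24 8 b7 (by decide) (by decide) (by decide) (by decide) (by decide) (by decide) (by decide) (by decide) (by decide)]
                  rcases h8 : pvColA carton 0 8 with _ | b8
                  · simp [pvCols, h8]
                  · rw [pvCols, h8]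
                    norm_num
                    rw [pvGoB.eq_def]
                    simp [pvCols]

-- ===== VERDICT =====
theorem mayores_abajo_spec : Claim_equal_mayores_abajo := by
  intro carton _ _
  show mayores_abajo carton = mayores_abajo_alt carton
  have h9 : PySem.List.pyRange 0 9 1 = [0,1,2,3,4,5,6,7,8] := by decide
  unfold mayores_abajo mayores_abajo_alt
  rw [h9, pv_A_cols, pv_B_cols]
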